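-- pv_equiv track=rewrite | github.com/0921sean/Programmers | Programmers_KIT/Brute_Force/test.py | solution
-- ===== SOURCE A (Python) =====
-- def solution(answers):
--     correct_list = []   # 정답 개수
--     answer = []
--
--     # 각 수포자 규칙
--     rule_list = [[1, 2, 3, 4, 5], [2, 1, 2, 3, 2, 4, 2, 5], [3, 3, 1, 1, 2, 2, 4, 4, 5, 5]]
--
--     for rule in rule_list:
--         question_num = 0
--         correct = 0
--
--         while question_num < len(answers):
--             if answers[question_num] == rule[question_num % len(rule)]:
--                 correct += 1
--             question_num += 1
--         correct_list.append(correct)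
--
--     for idx, correct in enumerate(correct_list):
--         if correct == max(correct_list):
--             answer.append(idx+1)
--     return answer
-- ===== SOURCE B (Python) =====
-- def solution(answers):
--     # Histogram positions by residue class mod 40 (= lcm of the pattern periods 5, 8, 10)
--     # paired with the answer value; each pattern's score is then 40 table lookups.
--     freq = {}
--     for i, a in enumerate(answers):
--         key = (i % 40, a)
--         freq[key] = freq.get(key, 0) + 1
--     patterns = [[1, 2, 3, 4, 5], [2, 1, 2, 3, 2, 4, 2, 5], [3, 3, 1, 1, 2, 2, 4, 4, 5, 5]]
--     scores = [sum(freq.get((r, p[r % len(p)]), 0) for r in range(40)) for p in patterns]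
--     best = max(scores)
--     return [i + 1 for i, s in enumerate(scores) if s == best]
-- ===== Notes on version B (the rewrite author's own statement) =====
-- stated objective: alternative
-- what changed: B never compares answers to patterns element-wise: one pass builds a histogram dict counting (i mod 40, answer) pairs (40 = lcm of the pattern periods 5, 8, 10), then each pattern's score is read off as a sum of 40 table lookups, and the winners are selected by a comprehension against the max computed once.
import Mathlib
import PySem

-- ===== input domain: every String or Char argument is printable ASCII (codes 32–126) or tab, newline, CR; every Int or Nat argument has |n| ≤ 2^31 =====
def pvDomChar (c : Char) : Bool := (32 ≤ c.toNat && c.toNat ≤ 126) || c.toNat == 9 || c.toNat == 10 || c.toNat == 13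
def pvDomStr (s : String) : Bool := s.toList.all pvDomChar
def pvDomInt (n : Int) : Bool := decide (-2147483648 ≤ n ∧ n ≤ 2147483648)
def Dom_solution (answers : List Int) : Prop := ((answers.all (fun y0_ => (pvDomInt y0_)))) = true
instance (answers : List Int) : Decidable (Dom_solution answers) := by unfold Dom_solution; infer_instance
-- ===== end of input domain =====

-- B replaces A's per-pattern scans by a residue-class histogram (dict keyed by (i mod 40, answer)); scores become table-lookup sums (alternative algorithm, same cost).


-- ===== PORT A =====
-- the while-loop over question_num (always 0 ≤ question_num < len(answers)) as a fold over the index range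
def countRule (answers rule : List Int) : Int :=
  (List.range answers.length).foldl
    (fun correct q =>
      if answers.getD q 0 = rule.getD (q % rule.length) 0 then correct + 1 else correct) 0

def ruleList : List (List Int) :=
  [[1, 2, 3, 4, 5], [2, 1, 2, 3, 2, 4, 2, 5], [3, 3, 1, 1, 2, 2, 4, 4, 5, 5]]

def solution (answers : List Int) : List Int :=
  let correct_list := ruleList.foldl (fun acc rule => acc ++ [countRule answers rule]) []
  (PySem.List.enumerate correct_list).foldl
    (fun answer p =>
      if some p.2 = PySem.List.max? correct_list (fun x => x) then answer ++ [p.1 + 1] else answer) []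

-- ===== PORT B =====
-- freq[(i % 40, a)] += 1 over enumerate(answers)
def freqB (answers : List Int) : PySem.Dict (Int × Int) Int :=
  (PySem.List.enumerate answers).foldl
    (fun d p =>
      d.insert (PySem.Int.mod p.1 40, p.2) (d.getD (PySem.Int.mod p.1 40, p.2) 0 + 1))
    PySem.Dict.empty

def patternsB : List (List Int) :=
  [[1, 2, 3, 4, 5], [2, 1, 2, 3, 2, 4, 2, 5], [3, 3, 1, 1, 2, 2, 4, 4, 5, 5]]

-- sum(freq.get((r, p[r % len(p)]), 0) for r in range(40))
def scoreB (freq : PySem.Dict (Int × Int) Int) (p : List Int) : Int :=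
  ((PySem.List.pyRange 0 40 1).map
    (fun r => freq.getD (r, PySem.List.pyGetD p (PySem.Int.mod r (p.length : Int)) 0) 0)).sum

def solution_alt (answers : List Int) : List Int :=
  let freq := freqB answers
  let scores := patternsB.map (scoreB freq)
  let best := (PySem.List.max? scores (fun x => x)).getD 0
  (PySem.List.enumerate scores).foldl
    (fun acc q => if q.2 = best then acc ++ [q.1 + 1] else acc) []

-- ===== PRECONDITION & SPEC =====
def Spec_solution (answers : List Int) (out : List Int) : Prop := out = solution_alt answers
instance (answers : List Int) (out : List Int) : Decidable (Spec_solution answers out) := by unfold Spec_solution; infer_instance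

-- ===== CLAIM (what is proved, stated in full; the proofs are below) =====
def Claim_equal_solution : Prop := ∀ (answers : List Int), Dom_solution answers → Spec_solution answers (solution answers)

-- ===== LEMMAS AND PROOFS =====

-- Python's i % k for a nonnegative i and positive k is plain Nat mod
theorem pyMod_natCast (n k : Nat) : PySem.Int.mod (n : Int) (k : Int) = ((n % k : Nat) : Int) := by
  simp [PySem.Int.mod, Int.fmod_eq_emod]

-- B's pattern lookup at a nonnegative cast index is a plain list getD
theorem pyGetD_mod (rule : List Int) (n : Nat) (k : Int) (hk : (rule.length : Int) = k) :
    PySem.List.pyGetD rule (PySem.Int.mod (n : Int) k) 0 = rule.getD (n % rule.length) 0 := by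
  subst hk
  rw [pyMod_natCast, PySem.List.pyGetD_natCast]

-- A's per-rule while-loop counts matching indices
theorem countRule_eq (ys rule : List Int) :
    countRule ys rule =
      (((List.range ys.length).countP
        (fun q => decide (ys.getD q 0 = rule.getD (q % rule.length) 0)) : Nat) : Int) := by
  unfold countRule
  rw [PySem.List.foldl_ite_add_one]
  simp

-- one more answer extends a per-rule count by its last comparison
theorem countRule_concat (xs : List Int) (x : Int) (rule : List Int) :
    countRule (xs ++ [x]) rule =
      if x = rule.getD (xs.length % rule.length) 0 then countRule xs rule + 1
      else countRule xs rule := by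
  rw [countRule_eq, countRule_eq]
  have hlen : (xs ++ [x]).length = xs.length + 1 := by simp
  rw [hlen, List.range_succ, List.countP_append]
  have hc : (List.range xs.length).countP
        (fun q => decide ((xs ++ [x]).getD q 0 = rule.getD (q % rule.length) 0)) =
      (List.range xs.length).countP
        (fun q => decide (xs.getD q 0 = rule.getD (q % rule.length) 0)) := by
    refine List.countP_congr ?_
    intro q hq
    have hq' : q < xs.length := List.mem_range.mp hq
    simp [List.getD, List.getElem?_append_left hq']
  rw [hc]
  have hx : (xs ++ [x]).getD xs.length 0 = x := by simp [List.getD]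
  simp only [List.countP_cons, List.countP_nil, hx]
  split_ifs <;> simp_all

-- a 0/1 sum over a nodup list selecting one key
theorem sum_ite_key (R : List Int) (hnd : R.Nodup) (g : Int → Int) (r0 y : Int) (hr : r0 ∈ R) :
    (R.map (fun r => if r0 = r ∧ y = g r then (1 : Int) else 0)).sum =
      if y = g r0 then 1 else 0 := by
  induction R with
  | nil => cases hr
  | cons a R ih =>
    obtain ⟨hna, hnd⟩ := List.nodup_cons.mp hnd
    by_cases ha : r0 = a
    · subst ha
      have hz : (R.map (fun r => if r0 = r ∧ y = g r then (1 : Int) else 0)).sum = 0 := by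
        apply List.sum_eq_zero
        intro z hzm
        rcases List.mem_map.mp hzm with ⟨r, hrR, hrz⟩
        have hne : r0 ≠ r := fun h => hna (h ▸ hrR)
        rw [← hrz]
        simp [hne]
      simp [hz]
    · have hr' : r0 ∈ R := by
        cases List.mem_cons.mp hr with
        | inl h => exact absurd h ha
        | inr h => exact h
      simp only [List.map_cons, List.sum_cons]
      rw [ih hnd hr']
      simp [ha]

-- the histogram score of a pattern whose period divides 40 is A's per-rule count
theorem scoreB_eq_countRule (answers p : List Int) (hdvd : p.length ∣ 40) :
    scoreB (freqB answers) p = countRule answers p := by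
  induction answers using List.reverseRecOn with
  | nil =>
    simp [scoreB, freqB, PySem.List.enumerate_nil, countRule]
  | append_singleton xs x ih =>
    -- unfold the fold over the one new enumerated element
    have hfold :
        freqB (xs ++ [x]) =
          (freqB xs).insert (PySem.Int.mod (xs.length : Int) 40, x)
            ((freqB xs).getD (PySem.Int.mod (xs.length : Int) 40, x) 0 + 1) := by
      unfold freqB
      rw [PySem.List.enumerate_append, List.foldl_append]
      simp [PySem.List.enumerate_cons, PySem.List.enumerate_nil]
    rw [hfold, countRule_concat, ← ih]
    unfold scoreB
    -- the new insert bumps exactly one of the 40 lookups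
    have hkey : PySem.Int.mod (xs.length : Int) 40 = ((xs.length % 40 : Nat) : Int) :=
      pyMod_natCast _ _
    have hmem : ((xs.length % 40 : Nat) : Int) ∈ PySem.List.pyRange 0 40 1 := by
      rw [PySem.List.mem_pyRange_one]
      constructor
      · exact Int.natCast_nonneg _
      · exact_mod_cast Nat.mod_lt _ (by norm_num)
    have hnd : (PySem.List.pyRange 0 40 1).Nodup := PySem.List.nodup_pyRange_one 0 40
    set pv : Int → Int := fun r => PySem.List.pyGetD p (PySem.Int.mod r (p.length : Int)) 0 with hpv
    have hsplit :
        ((PySem.List.pyRange 0 40 1).map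
          (fun r => ((freqB xs).insert (PySem.Int.mod (xs.length : Int) 40, x)
              ((freqB xs).getD (PySem.Int.mod (xs.length : Int) 40, x) 0 + 1)).getD (r, pv r) 0)).sum =
        ((PySem.List.pyRange 0 40 1).map (fun r => (freqB xs).getD (r, pv r) 0)).sum +
        ((PySem.List.pyRange 0 40 1).map
          (fun r => if PySem.Int.mod (xs.length : Int) 40 = r ∧ x = pv r then (1 : Int) else 0)).sum := by
      rw [← PySem.List.sum_map_add_int]
      congr 1
      refine List.map_congr_left ?_
      intro r _
      rw [PySem.Dict.getD_insert]
      by_cases h : PySem.Int.mod (xs.length : Int) 40 = r ∧ x = pv r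
      · have hp : ((r, pv r) : Int × Int) = (PySem.Int.mod (xs.length : Int) 40, x) := by
          rw [h.1, h.2]
        rw [if_pos hp, if_pos h, hp]
      · have hp : ((r, pv r) : Int × Int) ≠ (PySem.Int.mod (xs.length : Int) 40, x) := by
          intro he
          exact h ⟨(congrArg Prod.fst he).symm, (congrArg Prod.snd he).symm⟩
        rw [if_neg hp, if_neg h, add_zero]
    rw [hsplit]
    have hone :
        ((PySem.List.pyRange 0 40 1).map
          (fun r => if PySem.Int.mod (xs.length : Int) 40 = r ∧ x = pv r then (1 : Int) else 0)).sum =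
        if x = pv ((xs.length % 40 : Nat) : Int) then 1 else 0 := by
      rw [hkey]
      exact sum_ite_key _ hnd pv _ x hmem
    rw [hone]
    have hpveq : pv ((xs.length % 40 : Nat) : Int) = p.getD (xs.length % p.length) 0 := by
      rw [hpv]
      simp only
      rw [pyGetD_mod p (xs.length % 40) _ rfl, Nat.mod_mod_of_dvd _ hdvd]
    rw [hpveq]
    split_ifs <;> ring

-- collapsing A's final selection loop and B's comprehension to the same three-way comparison
theorem select_eq (a1 a2 a3 : Int) :
    (PySem.List.enumerate [a1, a2, a3]).foldl
      (fun answer p =>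
        if some p.2 = PySem.List.max? [a1, a2, a3] (fun x => x) then answer ++ [p.1 + 1]
        else answer) [] =
    (PySem.List.enumerate [a1, a2, a3]).foldl
      (fun acc q =>
        if q.2 = (PySem.List.max? [a1, a2, a3] (fun x => x)).getD 0 then acc ++ [q.1 + 1]
        else acc) [] := by
  have hmax : PySem.List.max? [a1, a2, a3] (fun x => x) = some (max (max a1 a2) a3) := by
    rw [PySem.List.max?_id_cons]
    simp
  rw [hmax]
  simp only [PySem.List.enumerate_cons, PySem.List.enumerate_nil, List.foldl_cons,
    List.foldl_nil, Option.some.injEq, Option.getD_some]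

theorem solution_eq (answers : List Int) : solution answers = solution_alt answers := by
  unfold solution solution_alt ruleList patternsB
  simp only [List.foldl_cons, List.foldl_nil, List.nil_append, List.map_cons, List.map_nil]
  simp only [scoreB_eq_countRule answers [1, 2, 3, 4, 5] (by norm_num),
    scoreB_eq_countRule answers [2, 1, 2, 3, 2, 4, 2, 5] (by norm_num),
    scoreB_eq_countRule answers [3, 3, 1, 1, 2, 2, 4, 4, 5, 5] (by norm_num)]
  exact select_eq _ _ _

-- ===== VERDICT (by name: the statement is the Claim_ definition above) =====
theorem solution_spec : Claim_equal_solution := by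
  intro answers _
  unfold Spec_solution
  exact solution_eq answers
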